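-- pv_equiv track=rewrite | github.com/fkguo/autoresearch-lab | skills/research-team/scripts/gates/check_project_charter.py | _strip_html_comments
-- ===== SOURCE A (Python) =====
-- def _strip_html_comments(text: str) -> str:
--     """
--     Remove hidden content like: <!-- [hidden](knowledge_base/foo.md) -->
--
--     Not a full HTML tokenizer; intentionally simple and defensive:
--     - Strips from each '<!--' to the next '-->'.
--     - If an opening '<!--' is never closed, drop the rest of the document.
--     """
--     out: list[str] = []
--     i = 0
--     while True:
--         start = text.find("<!--", i)
--         if start < 0:
--             out.append(text[i:])
--             break
--         out.append(text[i:start])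
--         end = text.find("-->", start + 4)
--         if end < 0:
--             break
--         i = end + 3
--     return "".join(out)
-- ===== SOURCE B (Python) =====
-- def _strip_html_comments(text: str) -> str:
--     # Single character-by-character pass driven by a two-state machine
--     # (outside-comment / inside-comment); no find() index bookkeeping.
--     out = []
--     i = 0
--     n = len(text)
--     in_comment = False
--     while i < n:
--         if in_comment:
--             if text.startswith("-->", i):
--                 in_comment = False
--                 i += 3
--             else:
--                 i += 1
--         else:
--             if text.startswith("<!--", i):
--                 in_comment = True
--                 i += 4
--             else:
--                 out.append(text[i])
--                 i += 1
--     return "".join(out)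
-- ===== Notes on version B (the rewrite author's own statement) =====
-- stated objective: alternative
-- what changed: Replaces the find()-driven loop that jumps between '<!--'/'-->' occurrences and collects slices with a single character-by-character two-state (outside/inside comment) state machine that emits kept characters one at a time.
import Mathlib
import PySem

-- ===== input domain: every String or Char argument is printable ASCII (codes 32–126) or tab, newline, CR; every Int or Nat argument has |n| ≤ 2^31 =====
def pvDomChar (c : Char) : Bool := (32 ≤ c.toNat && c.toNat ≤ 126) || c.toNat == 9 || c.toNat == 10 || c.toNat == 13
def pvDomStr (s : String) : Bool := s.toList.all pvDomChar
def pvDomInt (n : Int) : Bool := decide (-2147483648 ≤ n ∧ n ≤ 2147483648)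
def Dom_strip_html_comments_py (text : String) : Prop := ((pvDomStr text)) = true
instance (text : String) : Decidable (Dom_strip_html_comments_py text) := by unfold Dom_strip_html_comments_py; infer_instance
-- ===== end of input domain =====

-- B replaces A's find()-driven slice-collecting loop by a single character-by-character
-- two-state (outside/inside comment) machine; the return values are proved equal on all inputs.

-- ===== PORT A =====
-- A's 'while True' loop; 'fuel' only makes the recursion total (len+1 steps always suffice,
-- since i strictly increases and stays ≤ len; see stripALoop_eq below).
def stripALoop (cs : List Char) (i : Nat) (out : List (List Char)) (fuel : Nat) : List (List Char) :=
  match fuel with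
  | 0 => out
  | fuel + 1 =>
    let start := PySem.Chars.findFrom cs ['<', '!', '-', '-'] (i : Int)    -- text.find("<!--", i)
    if start < 0 then out ++ [PySem.Chars.slice cs (some (i : Int)) none]  -- out.append(text[i:]); break
    else
      let out2 := out ++ [PySem.Chars.slice cs (some (i : Int)) (some start)]  -- out.append(text[i:start])
      let e := PySem.Chars.findFrom cs ['-', '-', '>'] (start + 4)         -- text.find("-->", start + 4)
      if e < 0 then out2                                                   -- break
      else stripALoop cs (e + 3).toNat out2 fuel                           -- i = end + 3

def strip_html_comments_py (text : String) : String :=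
  String.ofList (stripALoop text.toList 0 [] (text.toList.length + 1)).flatten  -- "".join(out)

-- ===== PORT B =====
-- Source B's two states, one function per state: scanB = outside a comment, inCommentB = inside.
mutual
def scanB : List Char → List Char
  | '<' :: '!' :: '-' :: '-' :: rest => inCommentB rest   -- text.startswith("<!--", i): enter comment
  | c :: rest => c :: scanB rest                          -- keep the character
  | [] => []
def inCommentB : List Char → List Char
  | '-' :: '-' :: '>' :: rest => scanB rest               -- text.startswith("-->", i): leave comment
  | _ :: rest => inCommentB rest                          -- skip the character
  | [] => []                                              -- unclosed comment: rest already dropped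
end

def strip_html_comments_py_alt (text : String) : String :=
  String.ofList (scanB text.toList)

-- ===== PRECONDITION & SPEC =====
def Spec_strip_html_comments_py (text : String) (out : String) : Prop := out = strip_html_comments_py_alt text
instance (text : String) (out : String) : Decidable (Spec_strip_html_comments_py text out) := by unfold Spec_strip_html_comments_py; infer_instance

-- ===== CLAIM (what is proved, stated in full; the proofs are below) =====
def Claim_equal_strip_html_comments_py : Prop := ∀ (text : String), Dom_strip_html_comments_py text → Spec_strip_html_comments_py text (strip_html_comments_py text)

-- ===== LEMMAS AND PROOFS =====
theorem scanB_cons (c : Char) (t : List Char)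
    (h : ¬ ['<', '!', '-', '-'] <+: (c :: t)) : scanB (c :: t) = c :: scanB t := by
  rcases t with _ | ⟨b, _ | ⟨c2, _ | ⟨d, t⟩⟩⟩
  · rw [scanB] <;> simp
  · rw [scanB] <;> simp
  · rw [scanB] <;> simp
  · simp only [List.cons_prefix_cons, List.nil_prefix, and_true] at h
    rw [scanB]
    · rintro rest rfl heq
      injection heq with h1 heq; injection heq with h2 heq; injection heq with h3 heq
      exact h ⟨rfl, h1.symm, h2.symm, h3.symm⟩
theorem inCommentB_cons (c : Char) (t : List Char)
    (h : ¬ ['-', '-', '>'] <+: (c :: t)) : inCommentB (c :: t) = inCommentB t := by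
  rcases t with _ | ⟨b, _ | ⟨c2, t⟩⟩
  · rw [inCommentB] <;> simp
  · rw [inCommentB] <;> simp
  · simp only [List.cons_prefix_cons, List.nil_prefix, and_true] at h
    rw [inCommentB]
    · rintro rest rfl heq
      injection heq with h1 heq; injection heq with h2 heq
      exact h ⟨rfl, h1.symm, h2.symm⟩

theorem scanB_opener (r : List Char) : scanB ('<' :: '!' :: '-' :: '-' :: r) = inCommentB r := by
  rw [scanB]

theorem inCommentB_closer (r : List Char) : inCommentB ('-' :: '-' :: '>' :: r) = scanB r := by
  rw [inCommentB]

theorem scanB_of_not_infix (l : List Char)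
    (h : ¬ ['<', '!', '-', '-'] <:+: l) : scanB l = l := by
  induction l with
  | nil => rw [scanB]
  | cons c t ih =>
    rw [scanB_cons c t (fun hp => h hp.isInfix)]
    rw [ih (fun hi => h (hi.trans (List.suffix_cons c t).isInfix))]

theorem inCommentB_of_not_infix (l : List Char)
    (h : ¬ ['-', '-', '>'] <:+: l) : inCommentB l = [] := by
  induction l with
  | nil => rw [inCommentB]
  | cons c t ih =>
    rw [inCommentB_cons c t (fun hp => h hp.isInfix)]
    exact ih (fun hi => h (hi.trans (List.suffix_cons c t).isInfix))

theorem scanB_append (m l : List Char)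
    (h : ∀ j, j < m.length → ¬ ['<', '!', '-', '-'] <+: (m.drop j ++ l)) :
    scanB (m ++ l) = m ++ scanB l := by
  induction m with
  | nil => simp
  | cons c m' ih =>
    have h0 := h 0 (by simp)
    simp only [List.drop_zero] at h0
    rw [List.cons_append, scanB_cons c (m' ++ l) h0,
      ih (fun j hj => by simpa using h (j + 1) (by simpa using Nat.succ_lt_succ hj))]
    rfl

theorem inCommentB_append (m l : List Char)
    (h : ∀ j, j < m.length → ¬ ['-', '-', '>'] <+: (m.drop j ++ l)) :
    inCommentB (m ++ l) = inCommentB l := by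
  induction m with
  | nil => simp
  | cons c m' ih =>
    have h0 := h 0 (by simp)
    simp only [List.drop_zero] at h0
    rw [List.cons_append, inCommentB_cons c (m' ++ l) h0,
      ih (fun j hj => by simpa using h (j + 1) (by simpa using Nat.succ_lt_succ hj))]

theorem drop_decomp (cs : List Char) (a b : Nat) (hab : a ≤ b) :
    cs.drop a = (cs.drop a).take (b - a) ++ cs.drop b := by
  conv_lhs => rw [← List.take_append_drop (b - a) (cs.drop a)]
  rw [List.drop_drop, Nat.add_sub_cancel' hab]

theorem mid_drop (cs : List Char) (a b j : Nat) (hab : a ≤ b) (hj : j ≤ b - a) :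
    ((cs.drop a).take (b - a)).drop j ++ cs.drop b = cs.drop (a + j) := by
  rw [List.drop_take, List.drop_drop]
  have : b - a - j = b - (a + j) := by omega
  rw [this]
  exact (drop_decomp cs (a + j) b (by omega)).symm

theorem stripALoop_eq (cs : List Char) :
    ∀ fuel i out, i ≤ cs.length → cs.length + 1 - i ≤ fuel →
    (stripALoop cs i out fuel).flatten = out.flatten ++ scanB (cs.drop i) := by
  intro fuel
  induction fuel with
  | zero => intro i out hi hfuel; omega
  | succ fuel IH =>
    intro i out hi hfuel
    by_cases hF : PySem.Chars.findFrom cs ['<', '!', '-', '-'] (i : Int) = -1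
    · -- no opener: append text[i:] and stop
      simp only [stripALoop, hF]
      rw [if_pos (by norm_num)]
      rw [scanB_of_not_infix (cs.drop i)
        ((PySem.Chars.findFrom_natCast_eq_neg_one_iff cs _ i hi).mp hF)]
      simp [PySem.List.slice_from_natCast]
    · obtain ⟨hle, hpre, hmin⟩ := PySem.Chars.findFrom_natCast_spec cs ['<', '!', '-', '-'] i hi hF
      have hF0 : (0 : Int) ≤ PySem.Chars.findFrom cs ['<', '!', '-', '-'] (i : Int) :=
        le_trans (by positivity) hle
      set F := PySem.Chars.findFrom cs ['<', '!', '-', '-'] (i : Int) with hFdef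
      set s := F.toNat with hsdef
      have hFs : F = (s : Int) := (Int.toNat_of_nonneg hF0).symm
      have hsi : i ≤ s := by omega
      obtain ⟨r, hr⟩ := hpre
      have hr4 : cs.drop (s + 4) = r := by
        rw [← List.drop_drop (i := 4) (j := s), ← hr]; rfl
      have hslen : s + 4 ≤ cs.length := by
        have := congrArg List.length hr
        simp [List.length_drop] at this
        omega
      have hds : cs.drop s = '<' :: '!' :: '-' :: '-' :: cs.drop (s + 4) := by
        rw [hr4, ← hr]; rfl
      have hmidlen : ((cs.drop i).take (s - i)).length = s - i := by
        simp [List.length_take, List.length_drop]; omega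
      have hmid : scanB (cs.drop i)
          = (cs.drop i).take (s - i) ++ inCommentB (cs.drop (s + 4)) := by
        calc scanB (cs.drop i) = scanB ((cs.drop i).take (s - i) ++ cs.drop s) := by
              rw [← drop_decomp cs i s hsi]
          _ = (cs.drop i).take (s - i) ++ scanB (cs.drop s) := by
              refine scanB_append _ _ (fun j hj => ?_)
              rw [hmidlen] at hj
              rw [mid_drop cs i s j hsi (by omega)]
              exact hmin (i + j) (by omega) (by omega)
          _ = _ := by rw [hds, scanB_opener]
      have hF4 : F + 4 = ((s + 4 : Nat) : Int) := by rw [hFs]; push_cast; ring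
      by_cases hE : PySem.Chars.findFrom cs ['-', '-', '>'] ((s + 4 : Nat) : Int) = -1
      · -- opener but no closer: emit text[i:start] and drop the rest
        simp only [stripALoop, ← hFdef, hF4, hE]
        rw [if_neg (by omega), if_pos (by norm_num)]
        rw [hmid, inCommentB_of_not_infix (cs.drop (s + 4))
          ((PySem.Chars.findFrom_natCast_eq_neg_one_iff cs _ (s + 4) hslen).mp hE)]
        rw [hFs]
        simp [PySem.List.slice_natCast]
      · obtain ⟨hle2, hpre2, hmin2⟩ :=
          PySem.Chars.findFrom_natCast_spec cs ['-', '-', '>'] (s + 4) hslen hE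
        have hE0 : (0 : Int) ≤ PySem.Chars.findFrom cs ['-', '-', '>'] ((s + 4 : Nat) : Int) :=
          le_trans (by positivity) hle2
        set E := PySem.Chars.findFrom cs ['-', '-', '>'] ((s + 4 : Nat) : Int) with hEdef
        set t := E.toNat with htdef
        have hEt : E = (t : Int) := (Int.toNat_of_nonneg hE0).symm
        have hst : s + 4 ≤ t := by omega
        obtain ⟨r2, hr2⟩ := hpre2
        have hr3 : cs.drop (t + 3) = r2 := by
          rw [← List.drop_drop (i := 3) (j := t), ← hr2]; rfl
        have htlen : t + 3 ≤ cs.length := by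
          have := congrArg List.length hr2
          simp [List.length_drop] at this
          omega
        have hdt : cs.drop t = '-' :: '-' :: '>' :: cs.drop (t + 3) := by
          rw [hr3, ← hr2]; rfl
        have hmid2 : inCommentB (cs.drop (s + 4)) = scanB (cs.drop (t + 3)) := by
          calc inCommentB (cs.drop (s + 4))
              = inCommentB ((cs.drop (s + 4)).take (t - (s + 4)) ++ cs.drop t) := by
                rw [← drop_decomp cs (s + 4) t hst]
            _ = inCommentB (cs.drop t) := by
                refine inCommentB_append _ _ (fun j hj => ?_)
                have hjlen : ((cs.drop (s + 4)).take (t - (s + 4))).length = t - (s + 4) := by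
                  simp [List.length_take, List.length_drop]; omega
                rw [hjlen] at hj
                rw [mid_drop cs (s + 4) t j hst (by omega)]
                exact hmin2 (s + 4 + j) (by omega) (by omega)
            _ = _ := by rw [hdt, inCommentB_closer]
        have hE3 : (E + 3).toNat = t + 3 := by omega
        simp only [stripALoop, ← hFdef, hF4, ← hEdef]
        rw [if_neg (by omega), if_neg (by omega), hE3]
        rw [IH (t + 3) (out ++ [PySem.Chars.slice cs (some (i : Int)) (some F)])
          (by omega) (by omega)]
        rw [hmid, hmid2, hFs]
        simp [PySem.List.slice_natCast, List.append_assoc]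

-- ===== VERDICT (by name: the statement is the Claim_ definition above) =====
theorem strip_html_comments_py_spec : Claim_equal_strip_html_comments_py := by
  intro text _
  unfold Spec_strip_html_comments_py strip_html_comments_py strip_html_comments_py_alt
  rw [stripALoop_eq text.toList (text.toList.length + 1) 0 [] (by omega) (by omega)]
  simp
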